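-- pv_equiv track=rewrite | github.com/Netopip/modulo-3 | TOD/Lista2/Lista2_Q2.py | verificar_lista
-- ===== SOURCE A (Python) =====
-- def verificar_lista(lista):
--     quant_negativos = 0
--     soma_positivos =0
--     for i in lista:
--         if i < 0:
--             quant_negativos += 1
--         else:
--             soma_positivos += i
--     return quant_negativos, soma_positivos
-- ===== SOURCE B (Python) =====
-- def verificar_lista(lista):
--     s = sorted(lista)
--     k = 0
--     while k < len(s) and s[k] < 0:
--         k += 1
--     return (k, sum(s[k:]))
-- ===== Notes on version B (the rewrite author's own statement) =====
-- stated objective: alternative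
-- what changed: Sort-then-split: B sorts the list, locates the negative/non-negative boundary by scanning the sorted prefix, and returns (boundary index, sum of the suffix) instead of one pass with two accumulators.
import Mathlib
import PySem

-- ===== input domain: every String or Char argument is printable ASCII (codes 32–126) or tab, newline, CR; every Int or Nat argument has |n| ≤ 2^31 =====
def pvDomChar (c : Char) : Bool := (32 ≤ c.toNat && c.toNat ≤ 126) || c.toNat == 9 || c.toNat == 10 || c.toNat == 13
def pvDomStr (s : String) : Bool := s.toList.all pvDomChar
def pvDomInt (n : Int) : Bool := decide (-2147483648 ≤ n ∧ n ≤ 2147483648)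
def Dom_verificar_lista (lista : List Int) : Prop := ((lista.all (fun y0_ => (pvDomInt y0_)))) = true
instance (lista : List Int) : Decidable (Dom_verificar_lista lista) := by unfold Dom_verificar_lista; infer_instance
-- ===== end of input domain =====

-- B replaces A's single accumulating pass by sort-then-split: sort, find the negative/non-negative boundary, sum the suffix (alternative algorithm; not faster).


-- ===== PORT A =====
def verificar_lista (lista : List Int) : Int × Int :=
  lista.foldl (fun st i =>
    if i < 0 then (st.1 + 1, st.2) else (st.1, st.2 + i)) (0, 0)

-- ===== PORT B =====
-- the 'while k < len(s) and s[k] < 0: k += 1' scan over the sorted list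
def leadNeg : List Int → Nat
  | [] => 0
  | x :: xs => if x < 0 then leadNeg xs + 1 else 0

def verificar_lista_alt (lista : List Int) : Int × Int :=
  let s := PySem.List.sorted lista (fun x => x) false
  let k := leadNeg s
  ((k : Int), (s.drop k).sum)

-- ===== PRECONDITION & SPEC =====
def Spec_verificar_lista (lista : List Int) (out : Int × Int) : Prop := out = verificar_lista_alt lista
instance (lista : List Int) (out : Int × Int) : Decidable (Spec_verificar_lista lista out) := by unfold Spec_verificar_lista; infer_instance

-- ===== CLAIM (what is proved, stated in full; the proofs are below) =====
def Claim_equal_verificar_lista : Prop := ∀ (lista : List Int), Dom_verificar_lista lista → Spec_verificar_lista lista (verificar_lista lista)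

-- ===== LEMMAS AND PROOFS =====
theorem verificar_lista_foldl (l : List Int) (c s : Int) :
    l.foldl (fun st i => if i < 0 then (st.1 + 1, st.2) else (st.1, st.2 + i)) (c, s)
      = (c + ((l.filter (fun i => i < 0)).length : Int),
         s + (l.filter (fun i => 0 ≤ i)).sum) := by
  induction l generalizing c s with
  | nil => simp
  | cons x xs ih =>
    by_cases h : x < 0
    · simp [List.foldl, h, ih, not_le.mpr h]; ring
    · simp [List.foldl, h, ih, not_lt.mp h]; ring

theorem leadNeg_split (s : List Int) (h : s.Pairwise (· ≤ ·)) :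
    leadNeg s = (s.filter (fun i => i < 0)).length ∧
    s.drop (leadNeg s) = s.filter (fun i => 0 ≤ i) := by
  induction s with
  | nil => simp [leadNeg]
  | cons x xs ih =>
    rcases List.pairwise_cons.mp h with ⟨hx, hxs⟩
    rcases ih hxs with ⟨h1, h2⟩
    by_cases hneg : x < 0
    · constructor
      · simp [leadNeg, hneg, h1]
      · simp [leadNeg, hneg, h2, not_le.mpr hneg]
    · have hx0 : 0 ≤ x := not_lt.mp hneg
      have hall : ∀ y ∈ xs, ¬ y < 0 := fun y hy => not_lt.mpr (le_trans hx0 (hx y hy))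
      constructor
      · have hnil : List.filter (fun i => decide (i < 0)) xs = [] :=
          List.filter_eq_nil_iff.mpr (by intro y hy; simpa using hall y hy)
        simp [leadNeg, hneg, hnil]
      · have hself : List.filter (fun i => decide (0 ≤ i)) xs = xs :=
          List.filter_eq_self.mpr (by intro y hy; simpa using not_lt.mp (hall y hy))
        simp [leadNeg, hneg, hx0, hself]

theorem verificar_lista_spec : Claim_equal_verificar_lista := by
  intro l _
  unfold Spec_verificar_lista verificar_lista verificar_lista_alt
  have hperm : (PySem.List.sorted l (fun x => x) false).Perm l := PySem.List.sorted_perm l _ _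
  have hpw : (PySem.List.sorted l (fun x => x) false).Pairwise (· ≤ ·) := PySem.List.sorted_pairwise l _
  rcases leadNeg_split _ hpw with ⟨h1, h2⟩
  simp only [verificar_lista_foldl]
  rw [h2, h1]
  have e1 := (hperm.filter (fun i => decide (i < 0))).length_eq
  have e2 := (hperm.filter (fun i => decide (0 ≤ i))).sum_eq
  simp [e1, e2]
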